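-- pv_equiv track=rewrite | github.com/minhphan03/CodeSignal | Intro/Exploring the Waters/alternatingSums.py | solution
-- ===== SOURCE A (Python) =====
-- def solution(a):
--     team1 = 0
--     team2 = 0
--     u = len(a)
--     i = 1
--     while i < u:
--         team1 += a[i-1]
--         team2 += a[i]
--         i +=2
--     if i == u:
--         team1 += a[i-1]
--     return [team1, team2]
-- ===== SOURCE B (Python) =====
-- def solution(a):
--     return [sum(a[::2]), sum(a[1::2])]
-- ===== Notes on version B (the rewrite author's own statement) =====
-- stated objective: simpler
-- what changed: Replaces the manual index-stepping while loop with its odd-length tail fixup by two stride-2 slice summations, which handle the odd-length case automatically.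
import Mathlib
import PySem

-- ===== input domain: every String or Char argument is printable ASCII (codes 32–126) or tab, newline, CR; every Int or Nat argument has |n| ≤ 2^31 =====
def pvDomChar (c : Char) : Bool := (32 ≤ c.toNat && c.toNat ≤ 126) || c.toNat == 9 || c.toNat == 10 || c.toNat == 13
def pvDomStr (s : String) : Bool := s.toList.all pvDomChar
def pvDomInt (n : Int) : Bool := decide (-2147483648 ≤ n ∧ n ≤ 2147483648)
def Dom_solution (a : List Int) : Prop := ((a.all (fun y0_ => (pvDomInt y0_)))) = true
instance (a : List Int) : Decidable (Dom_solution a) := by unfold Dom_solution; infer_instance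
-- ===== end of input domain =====

-- B replaces A's index-stepping while loop (with manual odd-length tail fixup) by two stride-2 slice sums; objective: simpler.

-- ===== PORT A =====
-- the while loop; i is always ≥ 1 and a[i-1], a[i] are always in range when read,
-- so the .getD 0 default is never used and the port is exact
def solutionLoop (a : List Int) (u : Nat) (t1 t2 : Int) (i : Nat) : Int × Int × Nat :=
  if i < u then
    solutionLoop a u (t1 + (PySem.List.pyGet? a ((i : Int) - 1)).getD 0)
      (t2 + (PySem.List.pyGet? a (i : Int)).getD 0) (i + 2)
  else (t1, t2, i)
termination_by u - i

def solution (a : List Int) : List Int :=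
  let u := a.length
  let r := solutionLoop a u 0 0 1
  [if r.2.2 = u then r.1 + (PySem.List.pyGet? a ((r.2.2 : Int) - 1)).getD 0 else r.1, r.2.1]

-- ===== PORT B =====
def solution_alt (a : List Int) : List Int :=
  [((PySem.List.slice? a none none 2).getD []).sum,
   ((PySem.List.slice? a (some 1) none 2).getD []).sum]

-- ===== PRECONDITION & SPEC =====
def Spec_solution (a : List Int) (out : List Int) : Prop := out = solution_alt a
instance (a : List Int) (out : List Int) : Decidable (Spec_solution a out) := by unfold Spec_solution; infer_instance

-- ===== CLAIM (what is proved, stated in full; the proofs are below) =====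
def Claim_equal_solution : Prop := ∀ (a : List Int), Dom_solution a → Spec_solution a (solution a)

-- ===== LEMMAS AND PROOFS =====

-- every other element of a list, starting with the first (what a[::2] denotes)
def evens : List Int → List Int
  | [] => []
  | [x] => [x]
  | x :: _ :: r => x :: evens r

theorem evens_cons_tail (y : Int) (r : List Int) : evens (y :: r) = y :: evens r.tail := by
  cases r <;> simp [evens]

theorem filterMap_range_evens (xs : List Int) :
    (List.range ((xs.length + 1) / 2)).filterMap (fun k => xs[2 * k]?) = evens xs := by
  induction xs using evens.induct with
  | case1 => simp [evens]
  | case2 x => simp [evens]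
  | case3 x y r ih =>
      have hlen : ((x :: y :: r).length + 1) / 2 = (r.length + 1) / 2 + 1 := by
        simp; omega
      rw [hlen, List.range_succ_eq_map, List.filterMap_cons, List.filterMap_map]
      have hf : ∀ k : Nat, (x :: y :: r)[2 * (k + 1)]? = r[2 * k]? := by
        intro k
        have : 2 * (k + 1) = 2 * k + 1 + 1 := by omega
        simp [this]
      simp [evens, hf, ih]

theorem slice2_evens (xs : List Int) :
    PySem.List.slice? xs none none 2 = some (evens xs) := by
  rw [← filterMap_range_evens]
  simp only [PySem.List.slice?, PySem.List.sliceIndices]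
  norm_num
  congr 1
  congr 1
  split <;> omega

theorem slice2_odds (xs : List Int) :
    PySem.List.slice? xs (some 1) none 2 = some (evens xs.tail) := by
  cases xs with
  | nil => simp [PySem.List.slice?, PySem.List.sliceIndices, evens]
  | cons x t =>
      rw [show (x :: t).tail = t from rfl, ← filterMap_range_evens]
      simp only [PySem.List.slice?, PySem.List.sliceIndices]
      norm_num
      congr 1
      · funext k
        have h1 : ((1 : Int) + 2 * (k : Int)).toNat = 2 * k + 1 := by omega
        rw [h1]
        simp
      · congr 1
        split <;> omega

theorem loop_spec (l : List Int) : ∀ (a : List Int) (p : Nat) (t1 t2 : Int),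
    a.drop p = l →
    (let r := solutionLoop a a.length t1 t2 (p + 1);
     [if r.2.2 = a.length then r.1 + (PySem.List.pyGet? a ((r.2.2 : Int) - 1)).getD 0 else r.1,
      r.2.1])
    = [t1 + (evens l).sum, t2 + (evens l.tail).sum] := by
  induction l using evens.induct with
  | case1 =>
      intro a p t1 t2 hd
      have hlen : a.length ≤ p := by
        have := congrArg List.length hd
        simp at this; omega
      rw [solutionLoop]
      have h1 : ¬ (p + 1 < a.length) := by omega
      have h2 : ¬ (p + 1 = a.length) := by omega
      simp [h1, h2, evens]
  | case2 x =>
      intro a p t1 t2 hd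
      have hlen : a.length = p + 1 := by
        have := congrArg List.length hd
        simp at this
        have : p < a.length := by
          by_contra hc
          rw [List.drop_eq_nil_of_le (by omega)] at hd
          exact absurd hd (by simp)
        omega
      rw [solutionLoop]
      have h1 : ¬ (p + 1 < a.length) := by omega
      have hget : a[p]? = some x := by
        have : (a.drop p)[0]? = some x := by rw [hd]; rfl
        simpa using this
      have hp : ((p : Int) + 1 - 1) = (p : Int) := by ring
      obtain ⟨hh, hx⟩ := List.getElem?_eq_some_iff.mp hget
      simp [hlen, evens, hp, hx]
  | case3 x y r ih =>
      intro a p t1 t2 hd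
      have hlen : p + 2 ≤ a.length := by
        have := congrArg List.length hd
        simp at this
        have : p < a.length := by
          by_contra hc
          rw [List.drop_eq_nil_of_le (by omega)] at hd
          exact absurd hd (by simp)
        omega
      have hgx : a[p]? = some x := by
        have : (a.drop p)[0]? = some x := by rw [hd]; rfl
        simpa using this
      have hgy : a[p + 1]? = some y := by
        have : (a.drop p)[1]? = some y := by rw [hd]; rfl
        simpa using this
      have hdr : a.drop (p + 2) = r := by
        have : (a.drop p).drop 2 = r := by rw [hd]; rfl
        simpa [List.drop_drop, Nat.add_comm] using this
      rw [solutionLoop]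
      have h1 : p + 1 < a.length := by omega
      have hg1 : PySem.List.pyGet? a (((p + 1 : Nat) : Int) - 1) = some x := by
        rw [show (((p + 1 : Nat) : Int) - 1) = ((p : Nat) : Int) by push_cast; ring,
          PySem.List.pyGet?_natCast]; exact hgx
      have hg2 : PySem.List.pyGet? a ((p + 1 : Nat) : Int) = some y := by
        rw [PySem.List.pyGet?_natCast]; exact hgy
      simp only [h1, if_pos, hg1, hg2, Option.getD_some]
      have hih := ih a (p + 2) (t1 + x) (t2 + y) hdr
      simp only [show p + 1 + 2 = p + 2 + 1 from by omega] at *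
      rw [hih]
      rw [evens_cons_tail, show (x :: y :: r).tail = y :: r from rfl, evens_cons_tail]
      simp
      constructor <;> ring

-- ===== VERDICT (by name: the statement is the Claim_ definition above) =====
theorem solution_spec : Claim_equal_solution := by
  intro a _
  unfold Spec_solution solution solution_alt
  have h := loop_spec a a 0 0 0 (by simp)
  simp only [Nat.zero_add] at h
  rw [h, slice2_evens, slice2_odds]
  simp
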